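-- pv_equiv track=rewrite | github.com/MaasterOogwaay/CollegeWork | SoftwareDev/Year2/Sem1/Recursion/EX96b_skel.py | addGreaterTarget
-- ===== SOURCE A (Python) =====
-- def addGreaterTarget(listp, tar):
--    if len(listp) == 0:
--       return 0
--    else:
--       first = listp.pop(0)
--       if first > tar:
--          return first + addGreaterTarget(listp, tar)
--       else:
--          return 0 + addGreaterTarget(listp, tar)
-- ===== SOURCE B (Python) =====
-- def addGreaterTarget(listp, tar):
--     total = 0
--     while len(listp) != 0:
--         first = listp.pop(0)
--         if first > tar:
--             total += first
--     return total
-- ===== Notes on version B (the rewrite author's own statement) =====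
-- stated objective: simpler
-- what changed: Replaces the recursion with an iterative while-loop that accumulates a running total while draining the list from the front via pop(0), keeping the same mutation side effect.
import Mathlib
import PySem

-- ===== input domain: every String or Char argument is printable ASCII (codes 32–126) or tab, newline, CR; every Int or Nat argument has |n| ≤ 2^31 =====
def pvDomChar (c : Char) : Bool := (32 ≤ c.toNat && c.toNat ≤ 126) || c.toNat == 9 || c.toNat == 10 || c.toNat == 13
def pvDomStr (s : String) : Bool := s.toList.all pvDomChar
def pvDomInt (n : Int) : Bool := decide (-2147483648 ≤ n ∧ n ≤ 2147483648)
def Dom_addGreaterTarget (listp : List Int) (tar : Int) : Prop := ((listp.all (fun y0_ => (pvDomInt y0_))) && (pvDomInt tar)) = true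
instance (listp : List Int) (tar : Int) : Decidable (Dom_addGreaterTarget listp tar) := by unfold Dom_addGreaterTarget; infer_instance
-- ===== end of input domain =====

-- B replaces A's recursion with an iterative accumulator loop (same pop(0) drain side effect on the caller's list; the theorem is about the return value).
-- ===== PORT A =====
-- recursion: pop(0) = head; branch adds first or 0
def addGreaterTarget (listp : List Int) (tar : Int) : Int :=
  match listp with
  | [] => 0
  | first :: rest =>
      if first > tar then first + addGreaterTarget rest tar
      else 0 + addGreaterTarget rest tar

-- ===== PORT B =====
-- while-loop with accumulator 'total', draining the list from the front
def addGreaterTargetLoop (listp : List Int) (tar : Int) (total : Int) : Int :=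
  match listp with
  | [] => total
  | first :: rest =>
      addGreaterTargetLoop rest tar (if first > tar then total + first else total)

def addGreaterTarget_alt (listp : List Int) (tar : Int) : Int :=
  addGreaterTargetLoop listp tar 0

-- ===== PRECONDITION & SPEC =====
def Spec_addGreaterTarget (listp : List Int) (tar : Int) (out : Int) : Prop := out = addGreaterTarget_alt listp tar
instance (listp : List Int) (tar : Int) (out : Int) : Decidable (Spec_addGreaterTarget listp tar out) := by unfold Spec_addGreaterTarget; infer_instance

-- ===== CLAIM (what is proved, stated in full; the proofs are below) =====
def Claim_equal_addGreaterTarget : Prop := ∀ (listp : List Int) (tar : Int), Dom_addGreaterTarget listp tar → Spec_addGreaterTarget listp tar (addGreaterTarget listp tar)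

-- ===== LEMMAS AND PROOFS =====
theorem loop_acc (listp : List Int) (tar acc : Int) :
    addGreaterTargetLoop listp tar acc = acc + addGreaterTargetLoop listp tar 0 := by
  induction listp generalizing acc with
  | nil => simp [addGreaterTargetLoop]
  | cons x xs ih =>
      simp only [addGreaterTargetLoop]
      rw [ih, ih (if x > tar then 0 + x else 0)]
      split <;> ring

theorem eq_all (listp : List Int) (tar : Int) :
    addGreaterTarget listp tar = addGreaterTargetLoop listp tar 0 := by
  induction listp with
  | nil => rfl
  | cons x xs ih =>
      simp only [addGreaterTarget, addGreaterTargetLoop]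
      rw [loop_acc, ih]
      split <;> ring

-- ===== VERDICT (by name: the statement is the Claim_ definition above) =====
theorem addGreaterTarget_spec : Claim_equal_addGreaterTarget := by
  intro listp tar _
  unfold Spec_addGreaterTarget addGreaterTarget_alt
  exact eq_all listp tar
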